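-- pv_equiv track=rewrite | github.com/WaelGuemiza/My-Projects | Projet_Nonogram_final/functions/octavie.py | ligne_valide
-- ===== SOURCE A (Python) =====
-- def ligne_valide(ligne, contraintes):
--     """
--     Vérifie si une ligne donnée satisfait les contraintes.
--     ligne: liste de 0 et 1 représentant une ligne.
--     contraintes: liste des contraintes (par exemple, [2, 1] signifie deux cases
--     pleines, une case vide, une case pleine).
--     """
--     segments = []
--     compteur = 0
--
--     for cellule in ligne:
--         if cellule == 1: # si la case est noir
--             compteur += 1 # on incrémente le compteur
--         elif compteur > 0:
--             segments.append(compteur) # on ajoutele compteur à la liste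
--             compteur = 0 # on le remet à 0
--
--     if compteur > 0:
--         segments.append(compteur)
--
--     return segments == contraintes # si la liste est égale aux contraintes de
-- ===== SOURCE B (Python) =====
-- def ligne_valide(ligne, contraintes):
--     s = ''.join('1' if cellule == 1 else '0' for cellule in ligne)
--     segments = [len(part) for part in s.split('0') if part]
--     return segments == contraintes
-- ===== Notes on version B (the rewrite author's own statement) =====
-- stated objective: alternative
-- what changed: Replaced the incremental counter-and-append scan with a build-then-split decomposition: the line is mapped to a '1'/'0' string, split on '0', and the lengths of the nonempty fragments are compared to the constraints.
import Mathlib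
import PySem

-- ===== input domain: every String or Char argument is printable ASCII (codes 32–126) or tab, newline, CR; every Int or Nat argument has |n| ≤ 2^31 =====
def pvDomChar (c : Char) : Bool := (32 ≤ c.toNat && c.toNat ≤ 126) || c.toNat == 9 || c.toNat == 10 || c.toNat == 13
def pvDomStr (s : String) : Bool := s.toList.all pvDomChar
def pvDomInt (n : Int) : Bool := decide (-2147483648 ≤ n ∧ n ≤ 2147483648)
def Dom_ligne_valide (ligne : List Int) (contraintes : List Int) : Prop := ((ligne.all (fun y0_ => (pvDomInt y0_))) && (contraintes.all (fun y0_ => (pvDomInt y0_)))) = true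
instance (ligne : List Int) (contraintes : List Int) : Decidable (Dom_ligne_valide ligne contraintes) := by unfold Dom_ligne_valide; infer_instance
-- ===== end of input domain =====

-- B replaces A's incremental counter/append scan by mapping the line to '1'/'0' characters,
-- splitting on '0' and measuring the nonempty fragments (objective: alternative decomposition,
-- same cost; return value only, neither program mutates its arguments).

-- ===== PORT A =====
-- one step of A's for-loop over (segments, compteur)
def pvStepA (st : List Int × Int) (cellule : Int) : List Int × Int :=
  if cellule = 1 then (st.1, st.2 + 1)
  else if st.2 > 0 then (st.1 ++ [st.2], 0)
  else st

def ligne_valide (ligne : List Int) (contraintes : List Int) : Bool :=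
  let st := ligne.foldl pvStepA ([], 0)
  let segments := if st.2 > 0 then st.1 ++ [st.2] else st.1
  segments == contraintes

-- ===== PORT B =====
-- the character a cell becomes in B's string
def pvCell (cellule : Int) : Char := if cellule = 1 then '1' else '0'

def ligne_valide_alt (ligne : List Int) (contraintes : List Int) : Bool :=
  let s : List Char := ligne.map pvCell
  let segments : List Int :=
    ((s.splitOn '0').filter (fun part => !part.isEmpty)).map (fun part => (part.length : Int))
  segments == contraintes

-- ===== PRECONDITION & SPEC =====
def Spec_ligne_valide (ligne : List Int) (contraintes : List Int) (out : Bool) : Prop := out = ligne_valide_alt ligne contraintes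
instance (ligne : List Int) (contraintes : List Int) (out : Bool) : Decidable (Spec_ligne_valide ligne contraintes out) := by unfold Spec_ligne_valide; infer_instance

-- ===== CLAIM (what is proved, stated in full; the proofs are below) =====
def Claim_equal_ligne_valide : Prop := ∀ (ligne : List Int) (contraintes : List Int), Dom_ligne_valide ligne contraintes → Spec_ligne_valide ligne contraintes (ligne_valide ligne contraintes)

-- ===== LEMMAS AND PROOFS =====

-- the finalisation after A's loop (proof-side abbreviation)
def pvFin (st : List Int × Int) : List Int :=
  if st.2 > 0 then st.1 ++ [st.2] else st.1

-- peel the head part off the filtered-parts list (splitOnP never returns [])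
lemma pv_recon (ps : List (List Char)) (hps : ps ≠ []) :
    (ps.filter (fun part => !part.isEmpty)).map (fun part => (part.length : Int))
      = (if 0 < ps.headI.length then [(ps.headI.length : Int)] else [])
        ++ ((ps.tail.filter (fun part => !part.isEmpty)).map (fun part => (part.length : Int))) := by
  cases ps with
  | nil => exact absurd rfl hps
  | cons a t =>
    by_cases ha : a = []
    · subst ha; simp
    · have h0 : 0 < a.length := List.length_pos_iff.mpr ha
      simp [ha, h0]

-- A's scan with counter c equals: c merged with the first '1'-fragment, then the remaining fragments
lemma pv_main (l : List Int) (segs : List Int) (c : Nat) :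
    pvFin (l.foldl pvStepA (segs, (c : Int)))
    = segs
      ++ (if 0 < c + ((l.map pvCell).splitOnP (· == '0')).headI.length
            then [((c + ((l.map pvCell).splitOnP (· == '0')).headI.length : Nat) : Int)] else [])
      ++ ((((l.map pvCell).splitOnP (· == '0')).tail.filter (fun part => !part.isEmpty)).map
            (fun part => (part.length : Int))) := by
  induction l generalizing segs c with
  | nil =>
    simp only [List.foldl_nil, pvFin, List.map_nil, List.splitOnP_nil, List.headI_cons,
      List.tail_cons, List.length_nil, Nat.add_zero, List.filter_nil, List.map_nil,
      List.append_nil]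
    split_ifs with h1 h2 h2 <;> simp_all
  | cons x xs ih =>
    obtain ⟨a, t, hat⟩ : ∃ a t, (xs.map pvCell).splitOnP (· == '0') = a :: t := by
      cases h : (xs.map pvCell).splitOnP (· == '0') with
      | nil => exact absurd h (List.splitOnP_ne_nil _ _)
      | cons a t => exact ⟨a, t, rfl⟩
    by_cases hx : x = 1
    · subst hx
      have hstep : pvStepA (segs, (c : Int)) 1 = (segs, ((c + 1 : Nat) : Int)) := by
        simp [pvStepA]
      have hsplit : ((1 :: xs).map pvCell).splitOnP (· == '0') = ('1' :: a) :: t := by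
        simp [pvCell, List.splitOnP_cons, hat]
      have H := ih segs (c + 1)
      rw [hat] at H
      simp only [List.headI_cons, List.tail_cons] at H
      have e : c + 1 + a.length = c + (a.length + 1) := by omega
      rw [e] at H
      rw [List.foldl_cons, hstep, H, hsplit]
      simp only [List.headI_cons, List.tail_cons, List.length_cons]
    · have hstep : pvStepA (segs, (c : Int)) x
          = ((if 0 < c then segs ++ [(c : Int)] else segs), (0 : Int)) := by
        by_cases hc : 0 < c
        · have hc' : ((c : Int) > 0) := by exact_mod_cast hc
          simp [pvStepA, hx, hc]
        · have hc0 : c = 0 := by omega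
          subst hc0
          simp [pvStepA, hx]
      have hsplit : ((x :: xs).map pvCell).splitOnP (· == '0')
          = [] :: (xs.map pvCell).splitOnP (· == '0') := by
        simp [pvCell, hx, List.splitOnP_cons]
      have H := ih (if 0 < c then segs ++ [(c : Int)] else segs) 0
      simp only [Nat.cast_zero, Nat.zero_add] at H
      rw [hat] at H
      simp only [List.headI_cons, List.tail_cons] at H
      rw [List.foldl_cons, hstep, H, hsplit, hat]
      simp only [List.headI_cons, List.tail_cons, List.length_nil, Nat.add_zero]
      by_cases ha : a = []
      · subst ha
        by_cases hc : 0 < c <;> simp [hc]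
      · have h0 : 0 < a.length := List.length_pos_iff.mpr ha
        by_cases hc : 0 < c <;>
          simp [ha, h0, hc]

lemma pv_segments_eq (ligne : List Int) :
    pvFin (ligne.foldl pvStepA (([] : List Int), (0 : Int)))
    = (((ligne.map pvCell).splitOn '0').filter (fun part => !part.isEmpty)).map
        (fun part => (part.length : Int)) := by
  have h := pv_main ligne [] 0
  simp only [Nat.cast_zero, Nat.zero_add, List.nil_append] at h
  rw [h, List.splitOn, pv_recon _ (List.splitOnP_ne_nil _ _)]

-- ===== VERDICT (by name: the statement is the Claim_ definition above) =====
theorem ligne_valide_spec : Claim_equal_ligne_valide := by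
  intro ligne contraintes _hdom
  show (pvFin (ligne.foldl pvStepA ([], 0)) == contraintes) = _
  rw [pv_segments_eq ligne]
  rfl
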